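-- pv_equiv track=rewrite | github.com/corvusheretic/CharacterRecognition | CharacterHMM/api/base/configureHMM.py | zeroPadListToSize
-- ===== SOURCE A (Python) =====
-- def zeroPadListToSize(curList, size):
--     if(len(curList)==size):
--         return curList
--     elif(len(curList)<size):
--         curList.insert(0,0)
--         return zeroPadListToSize(curList, size)
--     else:
--         del curList[len(curList)-1]
--         return zeroPadListToSize(curList, size)
-- ===== SOURCE B (Python) =====
-- def zeroPadListToSize(curList, size):
--     # Bulk in-place version: one slice-assignment of leading zeros, or one
--     # slice-delete of the tail, instead of one-element-at-a-time recursion.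
--     # Mutates curList in place and returns the same object, like the original.
--     if len(curList) < size:
--         curList[:0] = [0] * (size - len(curList))
--     else:
--         del curList[size:]
--     return curList
-- ===== Notes on version B (the rewrite author's own statement) =====
-- stated objective: simpler
-- what changed: Replaces the element-at-a-time recursion (each step an insert(0,0) or a del of the last element) with a single bulk slice assignment of the zero prefix or a single slice-delete of the tail; still mutates curList in place and returns it.
import Mathlib
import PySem

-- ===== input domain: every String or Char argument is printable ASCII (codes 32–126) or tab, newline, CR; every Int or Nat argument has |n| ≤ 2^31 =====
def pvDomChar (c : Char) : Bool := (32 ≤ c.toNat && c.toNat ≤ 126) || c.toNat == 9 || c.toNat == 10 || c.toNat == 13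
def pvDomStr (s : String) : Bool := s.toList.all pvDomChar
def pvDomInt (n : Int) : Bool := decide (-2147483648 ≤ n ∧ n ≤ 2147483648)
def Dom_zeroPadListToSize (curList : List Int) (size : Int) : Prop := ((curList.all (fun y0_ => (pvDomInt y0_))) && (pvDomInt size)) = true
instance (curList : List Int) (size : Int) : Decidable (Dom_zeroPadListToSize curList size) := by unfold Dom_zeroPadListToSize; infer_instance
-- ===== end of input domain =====

-- B replaces the element-at-a-time recursion by one bulk zero-prefix prepend or one
-- tail slice-delete (simpler); both Pythons mutate curList in place and return it —
-- the equivalence proved here is about the return value.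


-- ===== PORT A =====
-- Literal port of A's recursion. In Python, when len(curList) > size with curList
-- empty (only reachable for size < 0), 'del curList[-1]' raises IndexError; the
-- port returns [] there as a totality guard — those inputs are outside Pre_.
def zeroPadListToSize (curList : List Int) (size : Int) : List Int :=
  if h1 : (curList.length : Int) = size then curList
  else if h2 : (curList.length : Int) < size then
    zeroPadListToSize (0 :: curList) size
  else
    match curList with
    | [] => []   -- Python raises IndexError here (size < 0); outside Pre_
    | a :: t => zeroPadListToSize (a :: t).dropLast size
termination_by 2 * (size - curList.length).toNat + curList.length
decreasing_by
  · simp only [List.length_cons]; omega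
  · simp only [List.length_dropLast, List.length_cons] at *
    omega

-- ===== PORT B =====
def zeroPadListToSize_alt (curList : List Int) (size : Int) : List Int :=
  if (curList.length : Int) < size then
    List.replicate (size - curList.length).toNat 0 ++ curList
  else
    PySem.List.slice curList none (some size)   -- what 'del curList[size:]' keeps

-- ===== PRECONDITION & SPEC =====
-- Pre_ excludes exactly size < 0, on which Python A raises IndexError (it trims the
-- list to empty and then 'del curList[-1]' fails).
def Pre_zeroPadListToSize (curList : List Int) (size : Int) : Prop := 0 ≤ size
instance (curList : List Int) (size : Int) : Decidable (Pre_zeroPadListToSize curList size) := by unfold Pre_zeroPadListToSize; infer_instance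
def pvWitness_zeroPadListToSize : List Int × Int := ([3, 1], 4)

def Spec_zeroPadListToSize (curList : List Int) (size : Int) (out : List Int) : Prop := out = zeroPadListToSize_alt curList size
instance (curList : List Int) (size : Int) (out : List Int) : Decidable (Spec_zeroPadListToSize curList size out) := by unfold Spec_zeroPadListToSize; infer_instance

-- ===== CLAIM (what is proved, stated in full; the proofs are below) =====
def Claim_equal_zeroPadListToSize : Prop := ∀ (curList : List Int) (size : Int), Dom_zeroPadListToSize curList size → Pre_zeroPadListToSize curList size → Spec_zeroPadListToSize curList size (zeroPadListToSize curList size)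

-- ===== LEMMAS AND PROOFS =====

lemma alt_eq_replicate (c : List Int) (s : Int) (h : (c.length : Int) < s) :
    zeroPadListToSize_alt c s = List.replicate (s - c.length).toNat 0 ++ c := by
  simp [zeroPadListToSize_alt, h]

lemma alt_eq_take (c : List Int) (s : Int) (h0 : 0 ≤ s) (h : ¬ (c.length : Int) < s) :
    zeroPadListToSize_alt c s = c.take s.toNat := by
  have hs : PySem.List.slice c none (some ((s.toNat : Nat) : Int)) = c.take s.toNat :=
    PySem.List.slice_to_natCast ..
  rw [Int.toNat_of_nonneg h0] at hs
  rw [zeroPadListToSize_alt, if_neg h, hs]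

lemma main_eq (c : List Int) (s : Int) (h0 : 0 ≤ s) :
    zeroPadListToSize c s = zeroPadListToSize_alt c s := by
  fun_induction zeroPadListToSize c s with
  | case1 c hlen =>
      rw [alt_eq_take c s h0 (by omega)]
      have : s.toNat = c.length := by omega
      simp [this]
  | case2 c hne hlt ih =>
      rw [ih, alt_eq_replicate c s hlt]
      by_cases h2 : ((0 :: c).length : Int) < s
      · rw [alt_eq_replicate _ _ h2]
        have : (s - (c.length : Int)).toNat = (s - ((0 :: c).length : Int)).toNat + 1 := by
          simp only [List.length_cons]; omega
        rw [this, List.replicate_succ', List.append_assoc]; rfl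
      · rw [alt_eq_take _ _ h0 h2]
        have hlen : s.toNat = (0 :: c).length := by simp at h2 ⊢; omega
        have h1 : (s - (c.length : Int)).toNat = 1 := by simp at hlen; omega
        simp [hlen, h1]
  | case3 h1 h2 =>
      exfalso; simp at h1 h2; omega
  | case4 a t h1 h2 ih =>
      rw [ih, alt_eq_take (a :: t) s h0 (by exact h2),
          alt_eq_take _ _ h0 (by simp at h1 h2 ⊢; omega)]
      rw [List.dropLast_eq_take, List.take_take]
      congr 1
      simp only [List.length_cons] at h1 h2 ⊢
      omega

-- ===== VERDICT (by name: the statement is the Claim_ definition above) =====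
theorem zeroPadListToSize_spec : Claim_equal_zeroPadListToSize := by
  intro c s _ hpre
  unfold Spec_zeroPadListToSize
  exact main_eq c s hpre
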